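-- pv_equiv track=rewrite | github.com/quack2025/multi-client-rag-backend | personas/temperature_optimization.py | _generate_diversity_recommendations
-- ===== SOURCE A (Python) =====
-- from typing import Dict, List, Any, Optional, Tuple
--
-- def _generate_diversity_recommendations(response: str, problems: List[str]) -> List[str]:
--     """Generate recommendations to improve response diversity"""
--     recommendations = []
--
--     if any("generic" in problem.lower() for problem in problems):
--         recommendations.append("Add more specific personal experiences and details")
--         recommendations.append("Include conditional statements (aunque, pero, sin embargo)")
--
--     if any("positivity" in problem.lower() for problem in problems):
--         recommendations.append("Balance positive aspects with realistic concerns")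
--         recommendations.append("Include mixed experiences and nuanced opinions")
--
--     if any("similarity" in problem.lower() for problem in problems):
--         recommendations.append("Increase temperature or adjust sampling parameters")
--         recommendations.append("Use more persona-specific context in prompting")
--
--     if any("details" in problem.lower() for problem in problems):
--         recommendations.append("Incorporate more personal history context")
--         recommendations.append("Reference specific situations or experiences")
--
--     if any("repetitive" in problem.lower() for problem in problems):
--         recommendations.append("Vary sentence structures and response patterns")
--         recommendations.append("Use different conversation styles based on persona")
--
--     return recommendations
-- ===== SOURCE B (Python) =====
-- from typing import List
--
-- def _generate_diversity_recommendations(response: str, problems: List[str]) -> List[str]: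
--     # Single pass over problems: lower each string once, set five flags,
--     # stop early once every keyword has been seen; then emit recommendations.
--     generic = positivity = similarity = details = repetitive = False
--     for p in problems:
--         pl = p.lower()
--         generic = generic or "generic" in pl
--         positivity = positivity or "positivity" in pl
--         similarity = similarity or "similarity" in pl
--         details = details or "details" in pl
--         repetitive = repetitive or "repetitive" in pl
--         if generic and positivity and similarity and details and repetitive:
--             break
--     out: List[str] = []
--     if generic:
--         out += ["Add more specific personal experiences and details",
--                 "Include conditional statements (aunque, pero, sin embargo)"]
--     if positivity:
--         out += ["Balance positive aspects with realistic concerns",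
--                 "Include mixed experiences and nuanced opinions"]
--     if similarity:
--         out += ["Increase temperature or adjust sampling parameters",
--                 "Use more persona-specific context in prompting"]
--     if details:
--         out += ["Incorporate more personal history context",
--                 "Reference specific situations or experiences"]
--     if repetitive:
--         out += ["Vary sentence structures and response patterns",
--                 "Use different conversation styles based on persona"]
--     return out
-- ===== Notes on version B (the rewrite author's own statement) =====
-- stated objective: faster
-- what changed: Inverts the traversal: instead of A's five separate any-scans over problems (each lowering every string again), B makes one pass over problems maintaining five boolean flags, lowers each problem exactly once, breaks early when all keywords have been seen, and only then emits the recommendation blocks from the flags.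
import Mathlib
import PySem

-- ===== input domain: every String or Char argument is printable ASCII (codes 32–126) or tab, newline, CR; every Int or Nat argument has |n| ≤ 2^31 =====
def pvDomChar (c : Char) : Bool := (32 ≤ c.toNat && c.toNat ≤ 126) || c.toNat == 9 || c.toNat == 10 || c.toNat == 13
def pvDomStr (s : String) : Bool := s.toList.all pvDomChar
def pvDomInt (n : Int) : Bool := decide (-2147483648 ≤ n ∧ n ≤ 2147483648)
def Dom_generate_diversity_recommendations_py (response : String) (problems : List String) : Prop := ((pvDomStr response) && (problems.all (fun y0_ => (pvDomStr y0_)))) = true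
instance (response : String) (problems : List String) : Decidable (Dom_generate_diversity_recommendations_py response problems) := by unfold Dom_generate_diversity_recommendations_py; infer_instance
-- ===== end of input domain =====

-- B replaces A's five independent any-scans by one pass over problems with five flags and an early break; equal return value.


-- ===== PORT A =====
def generate_diversity_recommendations_py (response : String) (problems : List String) : List String :=
  let recommendations : List String := []
  let recommendations := if problems.any (fun problem => PySem.Str.isIn "generic" (PySem.Str.lower problem)) then
      recommendations ++ ["Add more specific personal experiences and details",
                          "Include conditional statements (aunque, pero, sin embargo)"]
    else recommendations
  let recommendations := if problems.any (fun problem => PySem.Str.isIn "positivity" (PySem.Str.lower problem)) then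
      recommendations ++ ["Balance positive aspects with realistic concerns",
                          "Include mixed experiences and nuanced opinions"]
    else recommendations
  let recommendations := if problems.any (fun problem => PySem.Str.isIn "similarity" (PySem.Str.lower problem)) then
      recommendations ++ ["Increase temperature or adjust sampling parameters",
                          "Use more persona-specific context in prompting"]
    else recommendations
  let recommendations := if problems.any (fun problem => PySem.Str.isIn "details" (PySem.Str.lower problem)) then
      recommendations ++ ["Incorporate more personal history context",
                          "Reference specific situations or experiences"]
    else recommendations
  let recommendations := if problems.any (fun problem => PySem.Str.isIn "repetitive" (PySem.Str.lower problem)) then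
      recommendations ++ ["Vary sentence structures and response patterns",
                          "Use different conversation styles based on persona"]
    else recommendations
  recommendations

-- ===== PORT B =====
-- B: single pass over problems, five flags with early break, then emit blocks from the flags
def pvScanFlags : List String → Bool → Bool → Bool → Bool → Bool → Bool × Bool × Bool × Bool × Bool
  | [], g, po, si, de, re => (g, po, si, de, re)
  | p :: rest, g, po, si, de, re =>
    let pl := PySem.Str.lower p
    let g := g || PySem.Str.isIn "generic" pl
    let po := po || PySem.Str.isIn "positivity" pl
    let si := si || PySem.Str.isIn "similarity" pl
    let de := de || PySem.Str.isIn "details" pl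
    let re := re || PySem.Str.isIn "repetitive" pl
    if g && po && si && de && re then (g, po, si, de, re)
    else pvScanFlags rest g po si de re

def generate_diversity_recommendations_py_alt (response : String) (problems : List String) : List String :=
  let f := pvScanFlags problems false false false false false
  let out : List String := []
  let out := if f.1 then out ++ ["Add more specific personal experiences and details",
                                 "Include conditional statements (aunque, pero, sin embargo)"] else out
  let out := if f.2.1 then out ++ ["Balance positive aspects with realistic concerns",
                                   "Include mixed experiences and nuanced opinions"] else out
  let out := if f.2.2.1 then out ++ ["Increase temperature or adjust sampling parameters",
                                     "Use more persona-specific context in prompting"] else out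
  let out := if f.2.2.2.1 then out ++ ["Incorporate more personal history context",
                                       "Reference specific situations or experiences"] else out
  let out := if f.2.2.2.2 then out ++ ["Vary sentence structures and response patterns",
                                       "Use different conversation styles based on persona"] else out
  out

-- ===== PRECONDITION & SPEC =====
def Spec_generate_diversity_recommendations_py (response : String) (problems : List String) (out : List String) : Prop := out = generate_diversity_recommendations_py_alt response problems
instance (response : String) (problems : List String) (out : List String) : Decidable (Spec_generate_diversity_recommendations_py response problems out) := by unfold Spec_generate_diversity_recommendations_py; infer_instance

-- ===== CLAIM (what is proved, stated in full; the proofs are below) =====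
def Claim_equal_generate_diversity_recommendations_py : Prop := ∀ (response : String) (problems : List String), Dom_generate_diversity_recommendations_py response problems → Spec_generate_diversity_recommendations_py response problems (generate_diversity_recommendations_py response problems)

-- ===== LEMMAS AND PROOFS =====

lemma pvScanFlags_eq (ps : List String) : ∀ g po si de re,
    pvScanFlags ps g po si de re =
      (g || ps.any (fun p => PySem.Str.isIn "generic" (PySem.Str.lower p)),
       po || ps.any (fun p => PySem.Str.isIn "positivity" (PySem.Str.lower p)),
       si || ps.any (fun p => PySem.Str.isIn "similarity" (PySem.Str.lower p)),
       de || ps.any (fun p => PySem.Str.isIn "details" (PySem.Str.lower p)),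
       re || ps.any (fun p => PySem.Str.isIn "repetitive" (PySem.Str.lower p))) := by
  induction ps with
  | nil => intro g po si de re; simp [pvScanFlags]
  | cons p rest ih =>
    intro g po si de re
    simp only [pvScanFlags, List.any_cons]
    split
    · rename_i h
      simp only [Bool.and_eq_true] at h
      obtain ⟨⟨⟨⟨h1, h2⟩, h3⟩, h4⟩, h5⟩ := h
      simp only [← Bool.or_assoc, h1, h2, h3, h4, h5, Bool.true_or]

    · rw [ih]
      simp [Bool.or_assoc]

-- ===== VERDICT (by name: the statement is the Claim_ definition above) =====
theorem generate_diversity_recommendations_py_spec : Claim_equal_generate_diversity_recommendations_py := by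
  intro response problems _
  unfold Spec_generate_diversity_recommendations_py
  simp only [generate_diversity_recommendations_py, generate_diversity_recommendations_py_alt,
    pvScanFlags_eq, Bool.false_or, List.nil_append]
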